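-- pv_equiv track=rewrite | github.com/rhyn0/LeetCode-Problems | challenges/november_2023/daily/restore_from_adjacents.py | restoreArray
-- ===== SOURCE A (Python) =====
-- from collections import defaultdict
--
-- def restoreArray(adjacentPairs: list[list[int]]) -> list[int]:  # noqa: N803
--     """Restore an array from the adjacencies of the array.
--
--     The given adjacencies do not imply any order - i.e. the adjacency [i, j]
--     does not imply that the index of i is less than that of j.
--     For an original array of n unique numbers (and length n), there must be n-1
--     adjacencies to solve this.
--
--     Args:
--         adjacentPairs (list[list[int]]): List of adjacencies
--
--     Returns:
--         list[int]: A valid version of the original array.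
--     """
--     values_adjacent: defaultdict[int, list[int]] = defaultdict(list)
--     for num1, num2 in adjacentPairs:
--         values_adjacent[num1].append(num2)
--         values_adjacent[num2].append(num1)
--
--     start_val = next(key for key, val in values_adjacent.items() if len(val) == 1)
--     nums = [start_val]
--     curr_adjacency = values_adjacent.pop(start_val)
--     while values_adjacent:
--         for val in curr_adjacency:
--             if val not in values_adjacent:
--                 # previously popped, so the previous value in list
--                 continue
--             nums.append(val)
--             # only one number per adjacency can be appended
--             curr_adjacency = values_adjacent.pop(val)
--             break
--     return nums
-- ===== SOURCE B (Python) =====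
-- def restoreArray(adjacentPairs: list[list[int]]) -> list[int]:  # noqa: N803
--     """Rebuild the array by walking an immutable adjacency map with two pointers."""
--     adj: dict[int, list[int]] = {}
--     for num1, num2 in adjacentPairs:
--         adj.setdefault(num1, []).append(num2)
--         adj.setdefault(num2, []).append(num1)
--
--     curr = next(key for key, val in adj.items() if len(val) == 1)
--     prev = None
--     nums = [curr]
--     for _ in adjacentPairs:
--         nxt = next(v for v in adj[curr] if v != prev)
--         nums.append(nxt)
--         prev, curr = curr, nxt
--     return nums
-- ===== Notes on version B (the rewrite author's own statement) =====
-- stated objective: alternative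
-- what changed: B keeps the adjacency map immutable and walks it with a prev/curr two-pointer loop that runs exactly len(adjacentPairs) times, instead of A's destructive walk that pops every visited key and re-tests membership in the shrinking dict inside a while-nonempty loop.
-- outside the precondition, e.g. on restoreArray([[1, 1], [1, 2]]): A returns [2, 1], B returns [2, 1, 1]; on restoreArray([[1, 2], [1, 2], [2, 3]]): A returns [3, 2, 1], B raises StopIteration
import Mathlib
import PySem

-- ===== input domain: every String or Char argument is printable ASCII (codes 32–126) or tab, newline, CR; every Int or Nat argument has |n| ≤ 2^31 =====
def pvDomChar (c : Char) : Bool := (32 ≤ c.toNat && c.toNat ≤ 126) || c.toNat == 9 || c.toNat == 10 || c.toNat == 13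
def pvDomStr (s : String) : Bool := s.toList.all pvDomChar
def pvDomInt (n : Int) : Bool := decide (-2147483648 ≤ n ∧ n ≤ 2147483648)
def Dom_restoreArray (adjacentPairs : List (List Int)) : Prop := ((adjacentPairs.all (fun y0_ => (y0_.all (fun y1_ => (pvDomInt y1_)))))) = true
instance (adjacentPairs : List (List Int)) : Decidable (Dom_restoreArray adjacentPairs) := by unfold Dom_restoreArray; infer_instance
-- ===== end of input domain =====

-- B rebuilds the array by walking an IMMUTABLE adjacency map with a prev/curr two-pointer loop
-- run exactly len(adjacentPairs) times, instead of A's destructive pop-and-shrink walk (alternative decomposition, same cost).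


-- ===== PORT A =====
-- values_adjacent: defaultdict(list); for num1, num2 in adjacentPairs: append both directions.
-- (a pair that is not exactly [num1, num2] makes Python raise ValueError on unpacking; excluded by Pre_)
def buildAdjA (adjacentPairs : List (List Int)) : PySem.Dict Int (List Int) :=
  adjacentPairs.foldl
    (fun d p =>
      match p with
      | [n1, n2] => (d.modify n1 [] (· ++ [n2])).modify n2 [] (· ++ [n1])
      | _ => d)  -- ValueError in Python; outside Pre_
    PySem.Dict.empty

-- 'while values_adjacent: for val in curr_adjacency: if val not in …: continue; append; pop; break'.
-- fuel only bounds the iteration count (each real step pops one key, so d.size is enough); if the inner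
-- for-loop finds no poppable value Python loops forever — that case is outside Pre_ and the port returns nums.
def walkA : Nat → PySem.Dict Int (List Int) → List Int → List Int → List Int
  | 0, _, _, nums => nums
  | fuel + 1, d, currAdj, nums =>
    if d.items.isEmpty then nums
    else
      match currAdj.find? (fun v => d.contains v) with
      | some v => walkA fuel (d.erase v) (d.getD v []) (nums ++ [v])
      | none => nums  -- Python diverges here; outside Pre_

def restoreArray (adjacentPairs : List (List Int)) : List Int :=
  let d := buildAdjA adjacentPairs
  -- start_val = next(key for key, val in values_adjacent.items() if len(val) == 1)
  match d.items.find? (fun kv => kv.2.length == 1) with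
  | none => []  -- StopIteration in Python; outside Pre_
  | some kv => walkA d.size (d.erase kv.1) kv.2 [kv.1]

-- ===== PORT B =====
-- adj.setdefault(x, []).append(y): ensure the key exists with default [], then append y to its list
def buildAdjB (adjacentPairs : List (List Int)) : PySem.Dict Int (List Int) :=
  adjacentPairs.foldl
    (fun d p =>
      match p with
      | [n1, n2] =>
        let d1 := (d.setdefault n1 []).modify n1 [] (· ++ [n2])
        (d1.setdefault n2 []).modify n2 [] (· ++ [n1])
      | _ => d)  -- ValueError in Python; outside Pre_
    PySem.Dict.empty

-- one iteration of B's for-loop body; state none = the generator in next() was exhausted (StopIteration).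
-- adj[curr] is written adj.getD curr [] : curr is always a key (both pair endpoints are inserted).
def stepB (adj : PySem.Dict Int (List Int)) (st : Option (Option Int × Int × List Int)) :
    Option (Option Int × Int × List Int) :=
  match st with
  | none => none
  | some (prev, curr, nums) =>
    match (adj.getD curr []).find? (fun v => some v != prev) with
    | some nxt => some (some curr, nxt, nums ++ [nxt])
    | none => none  -- StopIteration in Python; outside Pre_

def restoreArray_alt (adjacentPairs : List (List Int)) : List Int :=
  let adj := buildAdjB adjacentPairs
  match adj.items.find? (fun kv => kv.2.length == 1) with
  | none => []  -- StopIteration in Python; outside Pre_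
  | some kv =>
    match adjacentPairs.foldl (fun st _ => stepB adj st) (some (none, kv.1, [kv.1])) with
    | some (_, _, nums) => nums
    | none => []  -- StopIteration in Python; outside Pre_

-- ===== PRECONDITION & SPEC =====
-- Pre_ = the input is a well-formed instance of the problem: the pairs are the adjacencies of one
-- simple path (2-element pairs, no self-loops, no repeated edge, |V| = |E| + 1, degree ≤ 2, connected).
-- It excludes inputs where A raises (ValueError/StopIteration) or diverges (disconnected edge sets), and
-- the degenerate multigraphs (self-loops / repeated edges) on which A's surviving chain walk still happens
-- to return — there A's value is an accident of its pop bookkeeping and B may return or raise differently.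
def pvEdges (adjacentPairs : List (List Int)) : List (Int × Int) :=
  adjacentPairs.map (fun p => (p.getD 0 0, p.getD 1 0))

def pvVerts (adjacentPairs : List (List Int)) : List Int :=
  PySem.Set.ofList ((pvEdges adjacentPairs).flatMap (fun e => [e.1, e.2]))

-- the neighbour list of v, in the order A's/B's defaultdict building produces it
def pvNbrs (adjacentPairs : List (List Int)) (v : Int) : List Int :=
  (pvEdges adjacentPairs).flatMap
    (fun e => (if e.1 = v then [e.2] else []) ++ (if e.2 = v then [e.1] else []))

-- connected components of the edge set: fold the edges, merging every component an edge touches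
def pvMergeComps (cs : List (List Int)) (e : Int × Int) : List (List Int) :=
  PySem.Set.ofList
      ((cs.filter (fun c => c.contains e.1 || c.contains e.2)).flatMap id ++ [e.1, e.2]) ::
    cs.filter (fun c => !(c.contains e.1 || c.contains e.2))

def pvConnected (adjacentPairs : List (List Int)) : Bool :=
  ((pvEdges adjacentPairs).foldl pvMergeComps []).length ≤ 1

def Pre_restoreArray (adjacentPairs : List (List Int)) : Prop :=
  (∀ p ∈ adjacentPairs, p.length = 2) ∧
  (∀ e ∈ pvEdges adjacentPairs, e.1 ≠ e.2) ∧
  ((pvEdges adjacentPairs).map (fun e => (min e.1 e.2, max e.1 e.2))).Nodup ∧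
  (pvVerts adjacentPairs).length = adjacentPairs.length + 1 ∧
  (∀ v ∈ pvVerts adjacentPairs, (pvNbrs adjacentPairs v).length ≤ 2) ∧
  pvConnected adjacentPairs = true

instance (adjacentPairs : List (List Int)) : Decidable (Pre_restoreArray adjacentPairs) := by
  unfold Pre_restoreArray; infer_instance

def pvWitness_restoreArray : List (List Int) := [[2, 1], [3, 4], [3, 2]]

def Spec_restoreArray (adjacentPairs : List (List Int)) (out : List Int) : Prop := out = restoreArray_alt adjacentPairs
instance (adjacentPairs : List (List Int)) (out : List Int) : Decidable (Spec_restoreArray adjacentPairs out) := by unfold Spec_restoreArray; infer_instance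

-- ===== CLAIM (what is proved, stated in full; the proofs are below) =====
def Claim_equal_restoreArray : Prop := ∀ (adjacentPairs : List (List Int)), Dom_restoreArray adjacentPairs → Pre_restoreArray adjacentPairs → Spec_restoreArray adjacentPairs (restoreArray adjacentPairs)

-- ===== LEMMAS AND PROOFS =====

-- ---- generic list lemmas ----
theorem pvFind?_congr {a : Type} (p q : a -> Bool) (l : List a)
    (h : forall x, x ∈ l -> p x = q x) : l.find? p = l.find? q := by
  induction l with
  | nil => rfl
  | cons x l ih =>
    rw [List.find?_cons, List.find?_cons, h x (by simp)]
    cases hq : q x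
    · simp only [hq]; exact ih (fun y hy => h y (by simp [hy]))
    · simp only [hq]

theorem pvLen1 {a : Type} (l : List a) (h : l.length = 1) (x : a) (hx : x ∈ l) : l = [x] := by
  match l, h with
  | [y], _ => simp at hx; simp [hx]

theorem pvLen2_mem {a : Type} (l : List a) (h : l.length ≤ 2) (x y : a)
    (hx : x ∈ l) (hy : y ∈ l) (hxy : x ≠ y) : forall z, z ∈ l -> z = x ∨ z = y := by
  match l with
  | [] => simp at hx
  | [u] => simp at hx hy; subst hx; subst hy; exact absurd rfl hxy
  | [u, v] =>
    intro z hz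
    simp at hx hy hz
    obtain hx | hx := hx <;> obtain hy | hy := hy <;> obtain hz | hz := hz <;> subst_vars <;>
      first | (exact Or.inl rfl) | (exact Or.inr rfl) | (exact absurd rfl hxy)
  | u :: v :: w :: l => simp at h

theorem pvNodup_len_le (l l' : List Int) (h : l.Nodup) (hs : l ⊆ l') : l.length ≤ l'.length := by
  calc l.length = l.toFinset.card := (List.toFinset_card_of_nodup h).symm
    _ ≤ l'.toFinset.card := Finset.card_le_card (by intro a ha; simp at ha ⊢; exact hs ha)
    _ ≤ l'.length := l'.toFinset_card_le

-- ---- Dict.erase facts (erase = filter of the items list) ----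
theorem pvAnyKey_filter {k v : Int} {nu : Type} (l : List (Int × nu)) (hvk : v ≠ k) :
    (l.filter (fun p => !(p.1 == k))).any (fun p => p.1 == v) = l.any (fun p => p.1 == v) := by
  induction l with
  | nil => rfl
  | cons p l ih =>
    by_cases hpk : p.1 = k
    · have hpv : (p.1 == v) = false := beq_eq_false_iff_ne.mpr (by rw [hpk]; exact Ne.symm hvk)
      have hf : (p :: l).filter (fun q => !(q.1 == k)) = l.filter (fun q => !(q.1 == k)) := by
        simp [List.filter_cons, hpk]
      rw [hf, ih, List.any_cons, hpv]
      simp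
    · have hf : (p :: l).filter (fun q => !(q.1 == k)) = p :: l.filter (fun q => !(q.1 == k)) := by
        simp [List.filter_cons, hpk]
      rw [hf, List.any_cons, List.any_cons, ih]

theorem pvFindKey_filter {k v : Int} {nu : Type} (l : List (Int × nu)) (hvk : v ≠ k) :
    (l.filter (fun p => !(p.1 == k))).find? (fun p => p.1 == v) = l.find? (fun p => p.1 == v) := by
  induction l with
  | nil => rfl
  | cons p l ih =>
    by_cases hpk : p.1 = k
    · have hpv : (p.1 == v) = false := beq_eq_false_iff_ne.mpr (by rw [hpk]; exact Ne.symm hvk)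
      have hf : (p :: l).filter (fun q => !(q.1 == k)) = l.filter (fun q => !(q.1 == k)) := by
        simp [List.filter_cons, hpk]
      rw [hf, ih, List.find?_cons, hpv]
    · have hf : (p :: l).filter (fun q => !(q.1 == k)) = p :: l.filter (fun q => !(q.1 == k)) := by
        simp [List.filter_cons, hpk]
      rw [hf, List.find?_cons, List.find?_cons]
      cases hpv : (p.1 == v)
      · simp only; exact ih
      · rfl

theorem pvContains_erase {nu : Type} (d : PySem.Dict Int nu) (k v : Int) (hvk : v ≠ k) :
    (d.erase k).contains v = d.contains v := by
  simp only [PySem.Dict.erase, PySem.Dict.contains]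
  exact pvAnyKey_filter d.items hvk

theorem pvContains_erase_self {nu : Type} (d : PySem.Dict Int nu) (k : Int) :
    (d.erase k).contains k = false := by
  simp only [PySem.Dict.erase, PySem.Dict.contains]
  simp [List.any_filter]

theorem pvGetD_erase {nu : Type} (d : PySem.Dict Int nu) (k v : Int) (d0 : nu) (hvk : v ≠ k) :
    (d.erase k).getD v d0 = d.getD v d0 := by
  simp only [PySem.Dict.erase, PySem.Dict.getD, PySem.Dict.get?]
  rw [pvFindKey_filter d.items hvk]

theorem pvLenFilter_erase {nu : Type} (k : Int) : forall (l : List (Int × nu)),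
    (l.map (fun p => p.1)).Nodup -> l.any (fun p => p.1 == k) = true ->
    (l.filter (fun p => !(p.1 == k))).length + 1 = l.length := by
  intro l
  induction l with
  | nil => intro _ hc; simp at hc
  | cons p l ih =>
    intro hnd hc
    simp only [List.map_cons, List.nodup_cons] at hnd
    by_cases hpk : p.1 = k
    · have : l.filter (fun q => !(q.1 == k)) = l := by
        apply List.filter_eq_self.mpr
        intro q hq
        simp only [Bool.not_eq_eq_eq_not, Bool.not_true, beq_eq_false_iff_ne]
        intro hqk
        exact hnd.1 (by rw [hpk, ← hqk]; exact List.mem_map.mpr ⟨q, hq, rfl⟩)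
      simp [List.filter_cons, hpk, this]
    · have hc' : l.any (fun p => p.1 == k) = true := by
        rcases List.any_eq_true.mp hc with ⟨q, hq, hqk⟩
        rcases List.mem_cons.mp hq with rfl | hq
        · exact absurd (by simpa using hqk) hpk
        · exact List.any_eq_true.mpr ⟨q, hq, hqk⟩
      have := ih hnd.2 hc'
      have hf : (p :: l).filter (fun q => !(q.1 == k)) = p :: l.filter (fun q => !(q.1 == k)) := by
        simp [List.filter_cons, hpk]
      rw [hf]
      simp only [List.length_cons]
      omega

theorem pvSize_erase {nu : Type} (d : PySem.Dict Int nu) (k : Int)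
    (hnd : d.keys.Nodup) (hc : d.contains k = true) :
    (d.erase k).size + 1 = d.size :=
  pvLenFilter_erase k d.items hnd hc

theorem pvKeysNodup_erase {nu : Type} (d : PySem.Dict Int nu) (k : Int)
    (hnd : d.keys.Nodup) : (d.erase k).keys.Nodup := by
  simp only [PySem.Dict.erase, PySem.Dict.keys] at *
  exact List.Nodup.sublist (List.Sublist.map _ List.filter_sublist) hnd

-- ---- the adjacency map both ports build ----
def pvEdgeFold (es : List (Int × Int)) (d : PySem.Dict Int (List Int)) : PySem.Dict Int (List Int) :=
  es.foldl (fun d e => (d.modify e.1 [] (· ++ [e.2])).modify e.2 [] (· ++ [e.1])) d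

theorem pvBuildA_eq (ps : List (List Int)) (h2 : forall p, p ∈ ps -> p.length = 2) :
    buildAdjA ps = pvEdgeFold (pvEdges ps) PySem.Dict.empty := by
  unfold buildAdjA pvEdgeFold pvEdges
  rw [List.foldl_map]
  apply PySem.List.foldl_congr_mem
  intro acc p hp
  match p, h2 p hp with
  | [n1, n2], _ => simp

theorem pvGetD_edgeFold (es : List (Int × Int)) (v : Int) : forall d,
    (pvEdgeFold es d).getD v [] =
      d.getD v [] ++ es.flatMap (fun e => (if e.1 = v then [e.2] else []) ++ (if e.2 = v then [e.1] else [])) := by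
  induction es with
  | nil => intro d; simp [pvEdgeFold]
  | cons e es ih =>
    intro d
    show (pvEdgeFold es _).getD v [] = _
    rw [ih]
    simp only [PySem.Dict.getD_modify]
    by_cases hv2 : v = e.2 <;> by_cases hv1 : v = e.1 <;>
      simp [hv1, hv2, eq_comm] <;> simp_all <;> split_ifs <;> simp_all

theorem pvKeys_modify' {nu : Type} (d : PySem.Dict Int nu) (k : Int) (d0 : nu) (f : nu -> nu) :
    (d.modify k d0 f).keys = if d.contains k = true then d.keys else d.keys ++ [k] := by
  rw [PySem.Dict.keys_modify]
  by_cases h : d.contains k = true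
  · rw [PySem.Dict.keys_insert_of_contains d _ h]; simp [h]
  · rw [PySem.Dict.keys_insert_of_not_contains d _ (by simpa using h)]; simp [h]

theorem pvDictContains_keys {nu : Type} (d : PySem.Dict Int nu) (k : Int) :
    d.contains k = d.keys.contains k := by
  by_cases h : k ∈ d.keys
  · rw [(PySem.Dict.contains_iff_mem_keys d k).mpr h, List.contains_iff_mem.mpr h]
  · have h1 : d.contains k = false := by
      cases hc : d.contains k
      · rfl
      · exact absurd ((PySem.Dict.contains_iff_mem_keys d k).mp hc) h
    have h2 : d.keys.contains k = false := by
      cases hc : d.keys.contains k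
      · rfl
      · exact absurd (List.contains_iff_mem.mp hc) h
    rw [h1, h2]

theorem pvKeys_step (d : PySem.Dict Int (List Int)) (e : Int × Int) :
    ((d.modify e.1 [] (· ++ [e.2])).modify e.2 [] (· ++ [e.1])).keys =
      PySem.Set.add (PySem.Set.add d.keys e.1) e.2 := by
  rw [pvKeys_modify', PySem.Dict.contains_modify, pvKeys_modify']
  by_cases h21 : e.2 = e.1 <;> by_cases hc1 : d.contains e.1 = true <;>
    by_cases hc2 : d.contains e.2 = true <;>
    simp_all [PySem.Set.add, pvDictContains_keys, List.contains_iff_mem] <;>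
    simp_all [← pvDictContains_keys, hc1, hc2]

theorem pvKeys_edgeFold (es : List (Int × Int)) : forall d,
    (pvEdgeFold es d).keys = PySem.Set.update d.keys (es.flatMap (fun e => [e.1, e.2])) := by
  induction es with
  | nil => intro d; simp [pvEdgeFold, PySem.Set.update]
  | cons e es ih =>
    intro d
    show (pvEdgeFold es _).keys = _
    rw [ih]
    have hupd : PySem.Set.update d.keys ((e :: es).flatMap (fun e => [e.1, e.2])) =
        PySem.Set.update (PySem.Set.add (PySem.Set.add d.keys e.1) e.2)
          (es.flatMap (fun e => [e.1, e.2])) := rfl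
    rw [hupd, pvKeys_step]

-- ---- graph facts about pvNbrs / pvVerts ----
theorem pvMem_contrib (es : List (Int × Int)) (v w : Int) :
    w ∈ es.flatMap (fun e => (if e.1 = v then [e.2] else []) ++ (if e.2 = v then [e.1] else [])) ↔
      ((v, w) ∈ es ∨ (w, v) ∈ es) := by
  induction es with
  | nil => simp
  | cons e es ih =>
    obtain ⟨a, b⟩ := e
    simp only [List.flatMap_cons, List.mem_append, ih, List.mem_cons]
    by_cases h1 : a = v <;> by_cases h2 : b = v <;> subst_vars <;>
      simp [Prod.ext_iff] <;> tauto

theorem pvMem_nbrs (ps : List (List Int)) (v w : Int) :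
    w ∈ pvNbrs ps v ↔ ((v, w) ∈ pvEdges ps ∨ (w, v) ∈ pvEdges ps) :=
  pvMem_contrib (pvEdges ps) v w

theorem pvNbrs_symm (ps : List (List Int)) (v w : Int) (h : w ∈ pvNbrs ps v) : v ∈ pvNbrs ps w := by
  rw [pvMem_nbrs] at h ⊢; tauto

theorem pvEdge_mem_verts (ps : List (List Int)) (e : Int × Int) (he : e ∈ pvEdges ps) :
    e.1 ∈ pvVerts ps ∧ e.2 ∈ pvVerts ps := by
  unfold pvVerts
  rw [PySem.Set.mem_ofList, PySem.Set.mem_ofList]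
  constructor <;> exact List.mem_flatMap.mpr ⟨e, he, by simp⟩

theorem pvNbrs_sub_verts (ps : List (List Int)) (v w : Int) (h : w ∈ pvNbrs ps v) :
    w ∈ pvVerts ps := by
  rw [pvMem_nbrs] at h
  rcases h with h | h
  · exact (pvEdge_mem_verts ps _ h).2
  · exact (pvEdge_mem_verts ps _ h).1

theorem pvVert_has_edge (ps : List (List Int)) (v : Int) (hv : v ∈ pvVerts ps) :
    ∃ e, e ∈ pvEdges ps ∧ (e.1 = v ∨ e.2 = v) := by
  unfold pvVerts at hv
  rw [PySem.Set.mem_ofList] at hv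
  obtain ⟨e, he, hm⟩ := List.mem_flatMap.mp hv
  exact ⟨e, he, by simp at hm; tauto⟩

theorem pvVerts_nodup (ps : List (List Int)) : (pvVerts ps).Nodup :=
  PySem.Set.nodup_ofList _

theorem pvNo_self (ps : List (List Int)) (h1 : forall e, e ∈ pvEdges ps -> e.1 ≠ e.2) (v : Int) :
    v ∉ pvNbrs ps v := by
  intro h
  rw [pvMem_nbrs] at h
  rcases h with h | h <;> exact h1 _ h rfl

-- ---- connectivity ----
theorem pvMerge_persist (T : Int -> Prop) (cs : List (List Int)) (e : Int × Int)
    (hP : forall c, c ∈ cs -> forall x, x ∈ c -> forall y, y ∈ c -> (T x ↔ T y))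
    (hcl : T e.1 ↔ T e.2) :
    (forall c, c ∈ pvMergeComps cs e -> forall x, x ∈ c -> forall y, y ∈ c -> (T x ↔ T y)) ∧
    (forall x y, (∃ c, c ∈ cs ∧ x ∈ c ∧ y ∈ c) -> ∃ c, c ∈ pvMergeComps cs e ∧ x ∈ c ∧ y ∈ c) ∧
    (∃ c, c ∈ pvMergeComps cs e ∧ e.1 ∈ c ∧ e.2 ∈ c) := by
  have hhead : forall x, x ∈ PySem.Set.ofList
      ((cs.filter (fun c => c.contains e.1 || c.contains e.2)).flatMap id ++ [e.1, e.2]) ->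
      (T x ↔ T e.1) := by
    intro x hx
    rw [PySem.Set.mem_ofList] at hx
    rcases List.mem_append.mp hx with hx | hx
    · obtain ⟨c, hc, hxc⟩ := List.mem_flatMap.mp hx
      obtain ⟨hccs, htouch⟩ := List.mem_filter.mp hc
      rcases Bool.or_eq_true_iff.mp htouch with ht | ht
      · exact hP c hccs x hxc e.1 (List.contains_iff_mem.mp ht)
      · exact (hP c hccs x hxc e.2 (List.contains_iff_mem.mp ht)).trans hcl.symm
    · simp at hx
      rcases hx with rfl | rfl
      · rfl
      · exact hcl.symm
  refine ⟨?_, ?_, ?_⟩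
  · intro c hc x hxc y hyc
    rcases List.mem_cons.mp hc with rfl | hc
    · exact (hhead x hxc).trans (hhead y hyc).symm
    · exact hP c (List.mem_filter.mp hc).1 x hxc y hyc
  · intro x y ⟨c, hccs, hxc, hyc⟩
    by_cases htouch : (c.contains e.1 || c.contains e.2) = true
    · refine ⟨_, List.mem_cons_self .., ?_, ?_⟩ <;>
        · rw [PySem.Set.mem_ofList]
          refine List.mem_append_left _ (List.mem_flatMap.mpr ⟨c, List.mem_filter.mpr ⟨hccs, htouch⟩, ?_⟩)
          first
          | exact hxc
          | exact hyc
    · have ht' : (c.contains e.1 || c.contains e.2) = false := by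
        cases h : (c.contains e.1 || c.contains e.2)
        · rfl
        · exact absurd h htouch
      exact ⟨c, List.mem_cons_of_mem _ (List.mem_filter.mpr ⟨hccs, by
        obtain ⟨hf1, hf2⟩ := Bool.or_eq_false_iff.mp ht'
        simp only [Bool.not_eq_eq_eq_not, Bool.not_true, Bool.or_eq_false_iff]
        exact ⟨hf1, hf2⟩⟩), hxc, hyc⟩
  · refine ⟨_, List.mem_cons_self .., ?_, ?_⟩ <;>
      · rw [PySem.Set.mem_ofList]
        exact List.mem_append_right _ (by simp)
  
theorem pvComps_spec (T : Int -> Prop) : forall (es : List (Int × Int)) (cs : List (List Int)),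
    (forall e, e ∈ es -> (T e.1 ↔ T e.2)) ->
    (forall c, c ∈ cs -> forall x, x ∈ c -> forall y, y ∈ c -> (T x ↔ T y)) ->
    (forall c, c ∈ es.foldl pvMergeComps cs -> forall x, x ∈ c -> forall y, y ∈ c -> (T x ↔ T y)) ∧
    (forall e, e ∈ es ∨ (∃ c, c ∈ cs ∧ e.1 ∈ c ∧ e.2 ∈ c) ->
      ∃ c, c ∈ es.foldl pvMergeComps cs ∧ e.1 ∈ c ∧ e.2 ∈ c) := by
  intro es
  induction es with
  | nil =>
    intro cs _ hP
    refine ⟨hP, ?_⟩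
    intro e he
    rcases he with he | he
    · simp at he
    · exact he
  | cons e0 es ih =>
    intro cs hcl hP
    obtain ⟨hP', hpersist, hcov⟩ := pvMerge_persist T cs e0 hP (hcl e0 (List.mem_cons_self ..))
    have hcl' : forall e, e ∈ es -> (T e.1 ↔ T e.2) := fun e he => hcl e (List.mem_cons_of_mem _ he)
    obtain ⟨ihP, ihC⟩ := ih (pvMergeComps cs e0) hcl' hP'
    refine ⟨ihP, ?_⟩
    intro e he
    rcases he with he | he
    · rcases List.mem_cons.mp he with rfl | he
      · exact ihC e (Or.inr hcov)
      · exact ihC e (Or.inl he)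
    · exact ihC e (Or.inr (hpersist e.1 e.2 he))

theorem pvConn_dichotomy (ps : List (List Int)) (h5 : pvConnected ps = true)
    (T : Int -> Prop) (hcl : forall e, e ∈ pvEdges ps -> (T e.1 ↔ T e.2)) :
    (forall v, v ∈ pvVerts ps -> T v) ∨ (forall v, v ∈ pvVerts ps -> ¬ T v) := by
  obtain ⟨hconst, hcov⟩ := pvComps_spec T (pvEdges ps) [] hcl (by simp)
  have hvc : forall v, v ∈ pvVerts ps ->
      ∃ c, c ∈ (pvEdges ps).foldl pvMergeComps [] ∧ v ∈ c := by
    intro v hv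
    obtain ⟨e, he, hve⟩ := pvVert_has_edge ps v hv
    obtain ⟨c, hc, h1, h2⟩ := hcov e (Or.inl he)
    rcases hve with rfl | rfl
    · exact ⟨c, hc, h1⟩
    · exact ⟨c, hc, h2⟩
  cases hV : pvVerts ps with
  | nil => left; intro v hv; simp at hv
  | cons v0 vrest =>
    have hv0 : v0 ∈ pvVerts ps := by rw [hV]; exact List.mem_cons_self ..
    have hall : forall v, v ∈ pvVerts ps -> (T v ↔ T v0) := by
      intro v hv
      obtain ⟨c, hc, hvc'⟩ := hvc v hv
      obtain ⟨c0, hc0, hv0c⟩ := hvc v0 hv0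
      have hceq : c = c0 := by
        unfold pvConnected at h5
        rcases hcomps : (pvEdges ps).foldl pvMergeComps [] with _ | ⟨c1, crest⟩
        · rw [hcomps] at hc; simp at hc
        · rw [hcomps] at h5 hc hc0
          simp at h5
          rw [h5] at hc hc0
          simp at hc hc0
          rw [hc, hc0]
      exact hconst c hc v hvc' v0 (hceq ▸ hv0c)
    by_cases hT : T v0
    · left; exact fun v hv => (hall v (by rw [hV]; exact hv)).mpr hT
    · right; exact fun v hv hTv => hT ((hall v (by rw [hV]; exact hv)).mp hTv)

theorem pvClosed_all (ps : List (List Int)) (h5 : pvConnected ps = true)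
    (xs : List Int) (hne : xs ≠ [])
    (hsub : forall v, v ∈ xs -> v ∈ pvVerts ps)
    (hcl : forall v, v ∈ xs -> forall w, w ∈ pvNbrs ps v -> w ∈ xs) :
    forall v, v ∈ pvVerts ps -> v ∈ xs := by
  have hcle : forall e, e ∈ pvEdges ps -> ((e.1 ∈ xs) ↔ (e.2 ∈ xs)) := by
    intro e he
    constructor
    · intro h; exact hcl e.1 h e.2 ((pvMem_nbrs ps e.1 e.2).mpr (Or.inl he))
    · intro h; exact hcl e.2 h e.1 ((pvMem_nbrs ps e.2 e.1).mpr (Or.inr he))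
  rcases pvConn_dichotomy ps h5 (· ∈ xs) hcle with h | h
  · exact h
  · obtain ⟨x, hx⟩ := List.exists_mem_of_ne_nil xs hne
    exact absurd hx (h x (hsub x hx))

-- ---- B's loop as pure iteration ----
def pvIter (adj : PySem.Dict Int (List Int)) : Nat -> Option (Option Int × Int × List Int) -> Option (Option Int × Int × List Int)
  | 0, st => st
  | r + 1, st => pvIter adj r (stepB adj st)

theorem pvFoldl_const (adj : PySem.Dict Int (List Int)) (l : List (List Int)) : forall st,
    l.foldl (fun st _ => stepB adj st) st = pvIter adj l.length st := by
  induction l with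
  | nil => intro st; rfl
  | cons x l ih => intro st; simp only [List.foldl_cons, List.length_cons]; exact ih _

-- ---- the coupled walk ----
theorem pvAdjGetD (ps : List (List Int)) (h2 : forall p, p ∈ ps -> p.length = 2) (v : Int) :
    (buildAdjA ps).getD v [] = pvNbrs ps v := by
  rw [pvBuildA_eq ps h2, pvGetD_edgeFold]
  simp [pvNbrs, PySem.Dict.getD_empty]

theorem pvAdjKeys (ps : List (List Int)) (h2 : forall p, p ∈ ps -> p.length = 2) :
    (buildAdjA ps).keys = pvVerts ps := by
  rw [pvBuildA_eq ps h2, pvKeys_edgeFold]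
  rw [PySem.Dict.keys_empty]
  rfl

theorem pvWalk_eq (ps : List (List Int))
    (h2 : forall p, p ∈ ps -> p.length = 2)
    (h1 : forall e, e ∈ pvEdges ps -> e.1 ≠ e.2)
    (hnorm : ((pvEdges ps).map (fun e => (min e.1 e.2, max e.1 e.2))).Nodup)
    (h4 : forall v, v ∈ pvVerts ps -> (pvNbrs ps v).length ≤ 2)
    (h5 : pvConnected ps = true) :
    forall (r fuel : Nat) (d : PySem.Dict Int (List Int)) (xs : List Int) (t : Int) (po : Option Int),
    d.size = r -> r ≤ fuel ->
    d.keys.Nodup ->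
    (forall v, d.contains v = true ↔ (v ∈ pvVerts ps ∧ v ∉ xs)) ->
    (forall v, d.contains v = true -> d.getD v [] = pvNbrs ps v) ->
    d.size + xs.length = (pvVerts ps).length ->
    xs.getLast? = some t ->
    xs.Nodup ->
    (forall v, v ∈ xs -> v ∈ pvVerts ps) ->
    (forall v, v ∈ xs.dropLast -> forall w, w ∈ pvNbrs ps v -> w ∈ xs) ->
    (forall w, w ∈ pvNbrs ps t -> w ∈ xs -> po = some w) ->
    (match po with
     | none => (pvNbrs ps t).length = 1
     | some p => p ∈ pvNbrs ps t ∧ xs.dropLast.getLast? = some p) ->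
    walkA fuel d (pvNbrs ps t) xs =
      (match pvIter (buildAdjA ps) r (some (po, t, xs)) with
       | some (_, _, nums) => nums
       | none => []) := by
  intro r
  induction r with
  | zero =>
    intro fuel d xs t po hsize _ _ _ _ _ _ _ _ _ _ _
    have hempty : d.items.isEmpty = true := by
      simp only [PySem.Dict.size] at hsize
      simp [List.isEmpty_iff, List.length_eq_zero_iff.mp hsize]
    cases fuel <;> simp [walkA, pvIter, hempty]
  | succ r ih =>
    intro fuel d xs t po hsize hfuel hnd hS1 hS2 hS3 hlast hxsnd hxsV hI4 hI5 hI6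
    have htmem : t ∈ xs := List.mem_of_getLast? hlast
    have htV : t ∈ pvVerts ps := hxsV t htmem
    have hxs_split : xs.dropLast ++ [t] = xs := List.dropLast_append_getLast? t hlast
    have hmem_xs : forall v, v ∈ xs -> v ∈ xs.dropLast ∨ v = t := by
      intro v hv
      rw [← hxs_split] at hv
      rcases List.mem_append.mp hv with h | h
      · exact Or.inl h
      · exact Or.inr (by simpa using h)
    have hne : d.items.isEmpty = false := by
      simp only [PySem.Dict.size] at hsize
      cases hi : d.items
      · rw [hi] at hsize; simp at hsize
      · simp [hi]
    cases fuel with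
    | zero => omega
    | succ f =>
      -- the two find?s scan the same list with pointwise-equal predicates
      have hpred : forall v, v ∈ pvNbrs ps t -> (d.contains v) = (some v != po) := by
        intro v hv
        by_cases hvxs : v ∈ xs
        · have hpo : po = some v := hI5 v hv hvxs
          have hc : d.contains v = false := by
            cases hc : d.contains v
            · rfl
            · exact absurd ((hS1 v).mp hc).2 (by simp [hvxs])
          rw [hc, hpo]
          simp
        · have hc : d.contains v = true := (hS1 v).mpr ⟨pvNbrs_sub_verts ps t v hv, hvxs⟩
          rw [hc]
          cases po with
          | none => rfl
          | some p =>
            have hpxs : p ∈ xs := by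
              rcases hI6 with ⟨-, hpl⟩
              exact List.mem_of_mem_dropLast (List.mem_of_getLast? hpl)
            have : v ≠ p := fun h => hvxs (h ▸ hpxs)
            simp [this]
      have hfind_eq : (pvNbrs ps t).find? (fun v => d.contains v) =
          (pvNbrs ps t).find? (fun v => some v != po) :=
        pvFind?_congr _ _ _ hpred
      cases hfind : (pvNbrs ps t).find? (fun v => some v != po) with
      | none =>
        exfalso
        have hstuck : forall v, v ∈ pvNbrs ps t -> v ∈ xs := by
          intro v hv
          have := List.find?_eq_none.mp hfind v hv
          by_contra hvxs
          have hc : d.contains v = true := (hS1 v).mpr ⟨pvNbrs_sub_verts ps t v hv, hvxs⟩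
          rw [hpred v hv] at hc
          exact this hc
        have hall : forall v, v ∈ pvVerts ps -> v ∈ xs := by
          apply pvClosed_all ps h5 xs (by intro h; rw [h] at htmem; simp at htmem) hxsV
          intro v hv w hw
          rcases hmem_xs v hv with h | h
          · exact hI4 v h w hw
          · exact hstuck w (h ▸ hw)
        have := pvNodup_len_le (pvVerts ps) xs (pvVerts_nodup ps) hall
        omega
      | some w =>
        have hw_mem : w ∈ pvNbrs ps t := List.mem_of_find?_eq_some hfind
        have hcw : d.contains w = true := by
          have hpw := List.find?_some hfind
          rw [hpred w hw_mem]
          exact hpw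
        obtain ⟨hwV, hwxs⟩ := (hS1 w).mp hcw
        have hfindA : (pvNbrs ps t).find? (fun v => d.contains v) = some w := by
          rw [hfind_eq, hfind]
        have hstepA : walkA (f + 1) d (pvNbrs ps t) xs =
            walkA f (d.erase w) (d.getD w []) (xs ++ [w]) := by
          simp [walkA, hne, hfindA]
        have hstepB : stepB (buildAdjA ps) (some (po, t, xs)) = some (some t, w, xs ++ [w]) := by
          simp only [stepB, pvAdjGetD ps h2 t, hfind]
        have hgd : d.getD w [] = pvNbrs ps w := hS2 w hcw
        have hsize' := pvSize_erase d w hnd hcw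
        rw [hstepA, hgd]
        have hRHS : (pvIter (buildAdjA ps) (r + 1) (some (po, t, xs))) =
            pvIter (buildAdjA ps) r (some (some t, w, xs ++ [w])) := by
          show pvIter (buildAdjA ps) r (stepB (buildAdjA ps) (some (po, t, xs))) = _
          rw [hstepB]
        rw [hRHS]
        apply ih f (d.erase w) (xs ++ [w]) w (some t)
        · omega
        · omega
        · exact pvKeysNodup_erase d w hnd
        · intro v
          by_cases hvw : v = w
          · subst hvw
            rw [pvContains_erase_self]
            constructor
            · intro h; simp at h
            · rintro ⟨-, h⟩; exact absurd (List.mem_append_right _ (by simp)) h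
          · rw [pvContains_erase d w v hvw, hS1 v]
            simp [hvw]
        · intro v hc
          have hvw : v ≠ w := by
            intro h
            rw [h, pvContains_erase_self] at hc
            exact absurd hc (by simp)
          rw [pvGetD_erase d w v [] hvw]
          exact hS2 v (by rw [← pvContains_erase d w v hvw]; exact hc)
        · simp only [List.length_append, List.length_cons, List.length_nil]
          omega
        · simp
        · simp only [List.nodup_append, List.nodup_cons]
          refine ⟨hxsnd, by simp, ?_⟩
          intro a ha b hb
          simp at hb
          subst hb
          exact fun heq => hwxs (heq ▸ ha)
        · intro v hv
          rcases List.mem_append.mp hv with h | h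
          · exact hxsV v h
          · simp at h; exact h ▸ hwV
        · intro v hv u hu
          rw [List.dropLast_concat] at hv
          have hsub : forall z, z ∈ pvNbrs ps t -> z ∈ xs ++ [w] := by
            intro z hz
            cases po with
            | none =>
              have : pvNbrs ps t = [w] := pvLen1 _ hI6 w hw_mem
              rw [this] at hz
              simp at hz
              simp [hz]
            | some p =>
              obtain ⟨hpN, hpl⟩ := hI6
              have hpxs : p ∈ xs := List.mem_of_mem_dropLast (List.mem_of_getLast? hpl)
              have hpw : p ≠ w := fun h => hwxs (h ▸ hpxs)
              rcases pvLen2_mem (pvNbrs ps t) (h4 t htV) p w hpN hw_mem hpw z hz with h | h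
              · exact List.mem_append_left _ (h ▸ hpxs)
              · simp [h]
          rcases hmem_xs v hv with h | h
          · exact List.mem_append_left _ (hI4 v h u hu)
          · exact hsub u (h ▸ hu)
        · intro u hu huxs
          rcases List.mem_append.mp huxs with h | h
          · rcases hmem_xs u h with h' | h'
            · exact absurd (hI4 u h' w (pvNbrs_symm ps w u hu)) hwxs
            · exact congrArg some h'.symm
          · simp at h
            exact absurd (h ▸ hu) (pvNo_self ps h1 w)
        · exact ⟨pvNbrs_symm ps t w hw_mem, by rw [List.dropLast_concat]; exact hlast⟩

theorem pvSetdefault_modify (d : PySem.Dict Int (List Int)) (k : Int) (x : Int) :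
    (d.setdefault k []).modify k [] (· ++ [x]) = d.modify k [] (· ++ [x]) := by
  by_cases hc : d.contains k = true
  · rw [PySem.Dict.setdefault_of_contains d [] hc]
  · have hc' : d.contains k = false := by
      cases h : d.contains k
      · rfl
      · exact absurd h hc
    rw [PySem.Dict.setdefault_of_not_contains d [] hc']
    show (d.insert k []).modify k [] (· ++ [x]) = _
    simp only [PySem.Dict.modify, PySem.Dict.getD_insert_self,
      PySem.Dict.insert_insert_self, PySem.Dict.getD_of_not_contains d [] hc']

theorem pvBuildB_eq_A (ps : List (List Int)) : buildAdjB ps = buildAdjA ps := by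
  unfold buildAdjB buildAdjA
  apply PySem.List.foldl_congr_mem
  intro acc p _
  match p with
  | [] => rfl
  | [n1] => rfl
  | [n1, n2] =>
    show (((acc.setdefault n1 []).modify n1 [] (· ++ [n2])).setdefault n2 []).modify n2 [] (· ++ [n1]) =
      (acc.modify n1 [] (· ++ [n2])).modify n2 [] (· ++ [n1])
    rw [pvSetdefault_modify, pvSetdefault_modify]
  | n1 :: n2 :: n3 :: rest => rfl

theorem restoreArray_main : forall (adjacentPairs : List (List Int)),
    Pre_restoreArray adjacentPairs -> restoreArray adjacentPairs = restoreArray_alt adjacentPairs := by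
  intro ps hpre
  obtain ⟨h2, h1, hnorm, h3, h4, h5⟩ := hpre
  have hBB : buildAdjB ps = buildAdjA ps := pvBuildB_eq_A ps
  simp only [restoreArray, restoreArray_alt, hBB]
  cases hfind : (buildAdjA ps).items.find? (fun kv => kv.2.length == 1) with
  | none => simp [hfind]
  | some kv =>
    simp only [hfind]
    have hkeys : (buildAdjA ps).keys = pvVerts ps := pvAdjKeys ps h2
    have hnd : (buildAdjA ps).keys.Nodup := by rw [hkeys]; exact pvVerts_nodup ps
    have hkmem : kv ∈ (buildAdjA ps).items := List.mem_of_find?_eq_some hfind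
    have hk1 : kv.2.length = 1 := by
      have := List.find?_some hfind
      simpa using this
    have hget : (buildAdjA ps).get? kv.1 = some kv.2 :=
      PySem.Dict.get?_of_mem_items (buildAdjA ps) (by simpa using hkmem) hnd
    have hgetD : (buildAdjA ps).getD kv.1 [] = kv.2 := by
      simp [PySem.Dict.getD, hget]
    have hN : kv.2 = pvNbrs ps kv.1 := by
      have := pvAdjGetD ps h2 kv.1
      rw [hgetD] at this
      exact this
    have hkmemkeys : kv.1 ∈ (buildAdjA ps).keys := List.mem_map.mpr ⟨kv, hkmem, rfl⟩
    have hkV : kv.1 ∈ pvVerts ps := by rw [← hkeys]; exact hkmemkeys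
    have hsizeV : (buildAdjA ps).size = (pvVerts ps).length := by
      have : (buildAdjA ps).size = (buildAdjA ps).keys.length := by
        simp [PySem.Dict.size, PySem.Dict.keys]
      rw [this, hkeys]
    have hcont : (buildAdjA ps).contains kv.1 = true :=
      (PySem.Dict.contains_iff_mem_keys _ kv.1).mpr hkmemkeys
    have hesize := pvSize_erase (buildAdjA ps) kv.1 hnd hcont
    rw [pvFoldl_const]
    rw [hN]
    apply pvWalk_eq ps h2 h1 hnorm h4 h5 ps.length ((buildAdjA ps).size)
      ((buildAdjA ps).erase kv.1) [kv.1] kv.1 none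
    · omega
    · omega
    · exact pvKeysNodup_erase _ kv.1 hnd
    · intro v
      by_cases hvk : v = kv.1
      · subst hvk
        rw [pvContains_erase_self]
        constructor
        · intro h; simp at h
        · rintro ⟨-, h⟩; exact absurd (by simp) h
      · rw [pvContains_erase _ kv.1 v hvk, PySem.Dict.contains_iff_mem_keys, hkeys]
        simp [hvk]
    · intro v hc
      have hvk : v ≠ kv.1 := by
        intro h
        rw [h, pvContains_erase_self] at hc
        exact absurd hc (by simp)
      rw [pvGetD_erase _ kv.1 v [] hvk]
      exact pvAdjGetD ps h2 v
    · simp only [List.length_cons, List.length_nil]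
      omega
    · rfl
    · simp
    · intro v hv
      simp at hv
      exact hv ▸ hkV
    · intro v hv
      simp at hv
    · intro w hw hwx
      simp at hwx
      exact absurd (hwx ▸ hw) (pvNo_self ps h1 kv.1)
    · rw [← hN]
      exact hk1

-- ===== VERDICT (by name: the statement is the Claim_ definition above) =====
theorem restoreArray_spec : Claim_equal_restoreArray := by
  intro ps _ hpre
  exact restoreArray_main ps hpre
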